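-- pv_equiv track=rewrite | github.com/fora22/CodingTest | fora22/Source/Programmers/commu-learning/2주차_중간고사_2.py | solution
-- ===== SOURCE A (Python) =====
-- from collections import Counter
--
-- def solution(people, tshirts):
--     p_cnt = Counter(people); ts_cnt = Counter(tshirts)
--
--     notGetClothesPeople = sorted((p_cnt - ts_cnt).elements(), reverse=True)  # 옷을 못받은 사람들
--     extraClothes = ts_cnt - p_cnt           # 여분의 옷
--     cnt = len(people) - len(notGetClothesPeople)
--
--     for p in notGetClothesPeople:
--         if len(extraClothes) == 0:
--             break
--         clothesNum = max(extraClothes)      # 제일 큰 사이즈의 옷 사이즈 구함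
--         if p in list(range(clothesNum)):    # 참가자 사이즈가 옷사이즈보다 작을 경우
--             cnt += 1
--             extraClothes = extraClothes - Counter({clothesNum: 1})
--
--
--     answer = cnt
--     return answer
-- ===== SOURCE B (Python) =====
-- from collections import Counter, deque
--
--
-- def solution(people, tshirts):
--     p_cnt = Counter(people)
--     ts_cnt = Counter(tshirts)
--     # people with no same-size shirt, largest first
--     unmatched = sorted((p_cnt - ts_cnt).elements(), reverse=True)
--     # leftover shirts, largest first
--     extra = deque(sorted((ts_cnt - p_cnt).elements(), reverse=True))
--     cnt = len(people) - len(unmatched)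
--     for p in unmatched:
--         if not extra:
--             break
--         if 0 <= p < extra[0]:
--             cnt += 1
--             extra.popleft()
--     return cnt
-- ===== Notes on version B (the rewrite author's own statement) =====
-- stated objective: faster
-- what changed: B sorts the leftover shirts once (descending) and walks them with a single pointer, replacing A's per-person recomputation of max() over the Counter and its 'p in list(range(size))' membership test (which materializes a list of `size` ints per person) with one integer comparison per step.
import Mathlib
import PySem

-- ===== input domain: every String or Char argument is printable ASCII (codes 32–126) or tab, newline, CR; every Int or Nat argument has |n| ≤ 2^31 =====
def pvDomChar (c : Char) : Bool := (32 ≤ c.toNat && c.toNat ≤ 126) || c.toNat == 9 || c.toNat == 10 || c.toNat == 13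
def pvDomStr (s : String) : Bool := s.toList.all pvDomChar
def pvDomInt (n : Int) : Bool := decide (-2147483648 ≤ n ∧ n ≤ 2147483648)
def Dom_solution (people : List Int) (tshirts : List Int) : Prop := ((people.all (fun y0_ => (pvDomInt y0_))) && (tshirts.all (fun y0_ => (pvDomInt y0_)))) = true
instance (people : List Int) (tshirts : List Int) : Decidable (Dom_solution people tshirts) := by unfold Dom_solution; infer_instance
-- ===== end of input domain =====

-- B replaces A's per-person max-of-Counter and list(range(size)) membership test by one
-- descending sort of the leftover shirts and a pointer walk with a plain comparison (objective: faster).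

-- ===== PORT A =====
-- shared helper: Python's Counter.__sub__ (both programs run exactly this code):
-- for each key of the left counter keep count_left - count_right if positive
-- (the second CPython loop over the right counter never fires here: all counts involved are ≥ 0)
def counterSub (c d : PySem.Dict Int Int) : PySem.Dict Int Int :=
  c.items.foldl (fun acc kv =>
    let nv := kv.2 - d.getD kv.1 0
    if 0 < nv then acc.insert kv.1 nv else acc) PySem.Dict.empty

-- shared helper: Counter.elements() — each key repeated count times, in counter order
def counterElements (c : PySem.Dict Int Int) : List Int :=
  c.items.flatMap (fun kv => List.replicate kv.2.toNat kv.1)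

-- A's for-loop over the unsatisfied people (with its break) as structural recursion
def solutionLoop (notGet : List Int) (extra : PySem.Dict Int Int) (cnt : Int) : Int :=
  match notGet with
  | [] => cnt
  | p :: rest =>
    if extra.items.length == 0 then cnt
    else
      match PySem.List.max? extra.keys (fun k => k) with
      | none => cnt  -- unreachable: max over a dict guarded by the emptiness check above
      | some clothesNum =>
        if (PySem.List.pyRange 0 clothesNum 1).contains p then
          solutionLoop rest (counterSub extra (PySem.Dict.empty.insert clothesNum 1)) (cnt + 1)
        else
          solutionLoop rest extra cnt

def solution (people : List Int) (tshirts : List Int) : Int :=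
  let p_cnt := PySem.Dict.counter people
  let ts_cnt := PySem.Dict.counter tshirts
  let notGetClothesPeople := PySem.List.sorted (counterElements (counterSub p_cnt ts_cnt)) (fun x => x) true
  let extraClothes := counterSub ts_cnt p_cnt
  let cnt := (people.length : Int) - (notGetClothesPeople.length : Int)
  solutionLoop notGetClothesPeople extraClothes cnt

-- ===== PORT B =====
-- B's for-loop: walk the descending list of extra shirts with a pointer (deque popleft)
def solutionAltLoop (unmatched : List Int) (extra : List Int) (cnt : Int) : Int :=
  match unmatched, extra with
  | [], _ => cnt
  | _ :: _, [] => cnt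
  | p :: rest, s :: srest =>
    if 0 ≤ p ∧ p < s then solutionAltLoop rest srest (cnt + 1)
    else solutionAltLoop rest (s :: srest) cnt

def solution_alt (people : List Int) (tshirts : List Int) : Int :=
  let p_cnt := PySem.Dict.counter people
  let ts_cnt := PySem.Dict.counter tshirts
  let unmatched := PySem.List.sorted (counterElements (counterSub p_cnt ts_cnt)) (fun x => x) true
  let extra := PySem.List.sorted (counterElements (counterSub ts_cnt p_cnt)) (fun x => x) true
  let cnt := (people.length : Int) - (unmatched.length : Int)
  solutionAltLoop unmatched extra cnt

-- ===== PRECONDITION & SPEC =====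
def Spec_solution (people : List Int) (tshirts : List Int) (out : Int) : Prop := out = solution_alt people tshirts
instance (people : List Int) (tshirts : List Int) (out : Int) : Decidable (Spec_solution people tshirts out) := by unfold Spec_solution; infer_instance

-- ===== CLAIM (what is proved, stated in full; the proofs are below) =====
def Claim_equal_solution : Prop := ∀ (people : List Int) (tshirts : List Int), Dom_solution people tshirts → Spec_solution people tshirts (solution people tshirts)

-- ===== LEMMAS AND PROOFS =====

-- descending Python sort of an Int list, as used by both ports
def sortDesc (l : List Int) : List Int := PySem.List.sorted l (fun x => x) true

-- the entry-wise function Counter.__sub__ applies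
def subEntry (d : PySem.Dict Int Int) (kv : Int × Int) : Option (Int × Int) :=
  if 0 < kv.2 - d.getD kv.1 0 then some (kv.1, kv.2 - d.getD kv.1 0) else none

theorem counterSub_aux (d : PySem.Dict Int Int) :
    ∀ (l : List (Int × Int)) (acc : PySem.Dict Int Int),
    (l.map (·.1)).Nodup → (∀ kv ∈ l, acc.contains kv.1 = false) →
    (l.foldl (fun acc kv =>
        let nv := kv.2 - d.getD kv.1 0
        if 0 < nv then acc.insert kv.1 nv else acc) acc).items
      = acc.items ++ l.filterMap (subEntry d)
  | [], acc, _, _ => by simp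
  | kv :: t, acc, hnd, hfresh => by
    simp only [List.foldl_cons, List.filterMap_cons]
    have hfr : acc.contains kv.1 = false := hfresh kv (List.mem_cons_self)
    have hnd' := hnd
    rw [List.map_cons, List.nodup_cons] at hnd'
    have hndt : (t.map (·.1)).Nodup := hnd'.2
    have hne : ∀ kv' ∈ t, kv'.1 ≠ kv.1 := by
      intro kv' h' heq
      exact hnd'.1 (heq ▸ List.mem_map_of_mem h')
    by_cases hc : 0 < kv.2 - d.getD kv.1 0
    · have hse : subEntry d kv = some (kv.1, kv.2 - d.getD kv.1 0) := by
        rw [subEntry, if_pos hc]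
      rw [hse]
      simp only [if_pos hc]
      rw [counterSub_aux d t (acc.insert kv.1 (kv.2 - d.getD kv.1 0)) hndt
        (by intro kv' h'
            rw [PySem.Dict.contains_insert]
            simp [hne kv' h', hfresh kv' (List.mem_cons_of_mem _ h')])]
      rw [PySem.Dict.items_insert_of_not_contains acc _ hfr]
      simp
    · have hse : subEntry d kv = none := by rw [subEntry, if_neg hc]
      rw [hse]
      simp only [if_neg hc]
      exact counterSub_aux d t acc hndt (fun kv' h' => hfresh kv' (List.mem_cons_of_mem _ h'))

theorem counterSub_items (c d : PySem.Dict Int Int) (h : c.keys.Nodup) :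
    (counterSub c d).items = c.items.filterMap (subEntry d) := by
  unfold counterSub
  rw [counterSub_aux d c.items PySem.Dict.empty h (by intro kv _; simp [PySem.Dict.contains_empty])]
  simp [PySem.Dict.empty]

theorem keys_filterMap_sublist (d : PySem.Dict Int Int) :
    ∀ (l : List (Int × Int)), ((l.filterMap (subEntry d)).map (·.1)).Sublist (l.map (·.1))
  | [] => by simp
  | kv :: t => by
    simp only [List.filterMap_cons, List.map_cons]
    by_cases hc : 0 < kv.2 - d.getD kv.1 0
    · rw [subEntry, if_pos hc]
      exact List.Sublist.cons₂ _ (keys_filterMap_sublist d t)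
    · rw [subEntry, if_neg hc]
      exact List.Sublist.cons _ (keys_filterMap_sublist d t)

theorem pos_of_mem_filterMap (d : PySem.Dict Int Int) (l : List (Int × Int))
    (kv : Int × Int) (h : kv ∈ l.filterMap (subEntry d)) : 0 < kv.2 := by
  rcases List.mem_filterMap.mp h with ⟨a, _, ha⟩
  rw [subEntry] at ha
  split_ifs at ha with hc
  cases ha
  exact hc

theorem keys_counterSub (c d : PySem.Dict Int Int) (h : c.keys.Nodup) :
    (counterSub c d).keys = (c.items.filterMap (subEntry d)).map (·.1) := by
  simp only [PySem.Dict.keys, counterSub_items c d h]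

theorem sortDesc_eq_of_perm_of_pairwise_ge (xs ys : List Int)
    (hp : ys.Perm xs) (hs : ys.Pairwise (fun a b => b ≤ a)) : sortDesc xs = ys := by
  have h1 : (sortDesc xs).Perm xs := PySem.List.sorted_perm xs (fun x => x) true
  have h2 : (sortDesc xs).Pairwise (fun a b => b ≤ a) := PySem.List.sorted_pairwise_rev xs (fun x => x)
  have := PySem.List.eq_of_perm_of_pairwise_le_of_injective (l₁ := (sortDesc xs).reverse)
    (l₂ := ys.reverse) (fun x : Int => x) (fun a b h => h)
    (((sortDesc xs).reverse_perm.trans ((h1.trans hp.symm).trans ys.reverse_perm.symm)))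
    (by rw [List.pairwise_reverse]; exact h2)
    (by rw [List.pairwise_reverse]; exact hs)
  exact List.reverse_injective this

theorem sortDesc_cons_max (xs : List Int) (m : Int) (hm : m ∈ xs)
    (hmax : ∀ x ∈ xs, x ≤ m) : sortDesc xs = m :: sortDesc (xs.erase m) := by
  refine sortDesc_eq_of_perm_of_pairwise_ge xs (m :: sortDesc (xs.erase m)) ?_ ?_
  · exact (List.cons_perm_iff_perm_erase).mpr ⟨hm, PySem.List.sorted_perm _ _ _⟩
  · rw [List.pairwise_cons]
    refine ⟨?_, PySem.List.sorted_pairwise_rev _ _⟩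
    intro y hy
    have : y ∈ xs.erase m := (PySem.List.mem_sorted _ _ _ _).mp hy
    exact hmax y (List.mem_of_mem_erase this)

theorem mem_counterElements (c : PySem.Dict Int Int) (x : Int)
    (h : x ∈ counterElements c) : x ∈ c.items.map (·.1) := by
  rcases List.mem_flatMap.mp h with ⟨kv, hkv, hx⟩
  rw [List.eq_of_mem_replicate hx]
  exact List.mem_map_of_mem hkv

theorem filterMap_subEntry_single_id (m : Int) (l : List (Int × Int))
    (hm : m ∉ l.map (·.1)) (hpos : ∀ kv ∈ l, 0 < kv.2) :
    l.filterMap (subEntry (PySem.Dict.empty.insert m 1)) = l := by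
  induction l with
  | nil => simp
  | cons kv t ih =>
    have hne : kv.1 ≠ m := by
      intro h
      exact hm (by rw [List.map_cons, ← h]; exact List.mem_cons_self)
    have hse : subEntry (PySem.Dict.empty.insert m 1) kv = some kv := by
      rw [subEntry, PySem.Dict.getD_insert, if_neg hne, PySem.Dict.getD_empty]
      rw [if_pos (by have := hpos kv List.mem_cons_self; omega)]
      simp
    rw [List.filterMap_cons, hse,
      ih (fun hx => hm (List.mem_cons_of_mem _ hx))
         (fun kv' h' => hpos kv' (List.mem_cons_of_mem _ h'))]

theorem flatMap_pre_not_mem (m : Int) (l : List (Int × Int)) (hm : m ∉ l.map (·.1)) :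
    m ∉ l.flatMap (fun kv => List.replicate kv.2.toNat kv.1) := by
  intro h
  rcases List.mem_flatMap.mp h with ⟨kv, hkv, hx⟩
  rw [List.eq_of_mem_replicate hx] at hm
  exact hm (List.mem_map_of_mem hkv)

theorem elements_counterSub_erase (c : PySem.Dict Int Int) (m vm : Int)
    (pre suf : List (Int × Int))
    (hsplit : c.items = pre ++ (m, vm) :: suf)
    (hnd : c.keys.Nodup) (hpos : ∀ kv ∈ c.items, 0 < kv.2) :
    counterElements (counterSub c (PySem.Dict.empty.insert m 1))
      = (counterElements c).erase m := by
  have hvm : 0 < vm := hpos (m, vm) (by rw [hsplit]; simp)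
  have hnd' := hnd
  simp only [PySem.Dict.keys, hsplit, List.map_append, List.map_cons] at hnd'
  rw [List.nodup_append] at hnd'
  obtain ⟨-, hnd2, hdisj⟩ := hnd'
  rw [List.nodup_cons] at hnd2
  have hmpre : m ∉ pre.map (·.1) := fun hmm => hdisj m hmm m List.mem_cons_self rfl
  have hmsuf : m ∉ suf.map (·.1) := hnd2.1
  have hprepos : ∀ kv ∈ pre, 0 < kv.2 := fun kv h => hpos kv (by rw [hsplit]; exact List.mem_append_left _ h)
  have hsufpos : ∀ kv ∈ suf, 0 < kv.2 :=
    fun kv h => hpos kv (by rw [hsplit]; exact List.mem_append_right _ (List.mem_cons_of_mem _ h))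
  have hmid : subEntry (PySem.Dict.empty.insert m 1) (m, vm)
      = if 0 < vm - 1 then some (m, vm - 1) else none := by
    rw [subEntry, PySem.Dict.getD_insert, if_pos rfl]
  have hitems : (counterSub c (PySem.Dict.empty.insert m 1)).items
      = pre ++ ((if 0 < vm - 1 then some (m, vm - 1) else none).toList ++ suf) := by
    rw [counterSub_items c _ hnd, hsplit, List.filterMap_append, List.filterMap_cons, hmid,
      filterMap_subEntry_single_id m pre hmpre hprepos,
      filterMap_subEntry_single_id m suf hmsuf hsufpos]
    split_ifs <;> simp
  unfold counterElements
  rw [hitems, hsplit]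
  simp only [List.flatMap_append, List.flatMap_cons]
  rw [List.erase_append_right _ (flatMap_pre_not_mem m pre hmpre)]
  congr 1
  have hrep : List.replicate vm.toNat m = m :: List.replicate (vm - 1).toNat m := by
    have : vm.toNat = (vm - 1).toNat + 1 := by omega
    rw [this, List.replicate_succ]
  rw [hrep, List.cons_append, List.erase_cons_head]
  split_ifs with h1
  · simp
  · have h0 : (vm - 1).toNat = 0 := by omega
    simp [h0]

theorem counterSub_nodup_keys (c d : PySem.Dict Int Int) (h : c.keys.Nodup) :
    (counterSub c d).keys.Nodup := by
  rw [keys_counterSub c d h]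
  exact (keys_filterMap_sublist d c.items).nodup h

theorem counterSub_pos (c d : PySem.Dict Int Int) (h : c.keys.Nodup) :
    ∀ kv ∈ (counterSub c d).items, 0 < kv.2 := by
  intro kv hkv
  rw [counterSub_items c d h] at hkv
  exact pos_of_mem_filterMap d c.items kv hkv

theorem loop_eq (um : List Int) (c : PySem.Dict Int Int) (cnt : Int)
    (hnd : c.keys.Nodup) (hpos : ∀ kv ∈ c.items, 0 < kv.2) :
    solutionLoop um c cnt = solutionAltLoop um (sortDesc (counterElements c)) cnt := by
  induction um generalizing c cnt with
  | nil => rfl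
  | cons p rest ih =>
    rw [solutionLoop]
    by_cases hemp : c.items = []
    · have hce : counterElements c = [] := by unfold counterElements; rw [hemp]; rfl
      have hsd : sortDesc (counterElements c) = [] := by
        rw [hce]; exact (PySem.List.sorted_eq_nil_iff _ _ _).mpr rfl
      rw [hsd, if_pos (by rw [hemp]; rfl)]
      rfl
    · have hlen : (c.items.length == 0) = false := by
        simp [List.length_eq_zero_iff, hemp]
      rw [hlen]
      simp only [Bool.false_eq_true, if_false]
      have hkeysne : c.keys ≠ [] := by
        simp only [PySem.Dict.keys]
        simpa using hemp
      obtain ⟨m, hm⟩ : ∃ m, PySem.List.max? c.keys (fun k => k) = some m := by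
        cases hmx : PySem.List.max? c.keys (fun k => k) with
        | none => exact absurd ((PySem.List.max?_eq_none_iff _ _).mp hmx) hkeysne
        | some m => exact ⟨m, rfl⟩
      obtain ⟨⟨mk, vm⟩, hmem, hfst⟩ := List.mem_map.mp (PySem.List.max?_mem hm)
      simp only at hfst
      subst hfst
      obtain ⟨pre, suf, hsplit⟩ := List.append_of_mem hmem
      have hvm : 0 < vm := hpos _ hmem
      have hmmem : mk ∈ counterElements c := by
        unfold counterElements
        rw [hsplit]
        simp only [List.flatMap_append, List.flatMap_cons]
        refine List.mem_append_right _ (List.mem_append_left _ ?_)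
        exact List.mem_replicate.mpr ⟨by omega, rfl⟩
      have hmmax : ∀ x ∈ counterElements c, x ≤ mk :=
        fun x hx => PySem.List.max?_isMax hm x (mem_counterElements c x hx)
      have hsd : sortDesc (counterElements c) = mk :: sortDesc ((counterElements c).erase mk) :=
        sortDesc_cons_max _ mk hmmem hmmax
      rw [hsd, solutionAltLoop]
      simp only [hm]
      have herase : counterElements (counterSub c (PySem.Dict.empty.insert mk 1))
          = (counterElements c).erase mk :=
        elements_counterSub_erase c mk vm pre suf hsplit hnd hpos
      by_cases hcond : 0 ≤ p ∧ p < mk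
      · have hcont : (PySem.List.pyRange 0 mk 1).contains p = true := by
          simp only [List.contains_iff_mem]
          exact PySem.List.mem_pyRange_one.mpr hcond
        rw [hcont]
        simp only [if_true, if_pos hcond]
        rw [ih _ _ (counterSub_nodup_keys c _ hnd) (counterSub_pos c _ hnd), herase]
      · have hcont : (PySem.List.pyRange 0 mk 1).contains p = false := by
          simp [PySem.List.mem_pyRange_one]
          omega
        rw [hcont]
        simp only [Bool.false_eq_true, if_false, if_neg hcond]
        rw [ih _ _ hnd hpos, hsd]

-- ===== VERDICT (by name: the statement is the Claim_ definition above) =====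
theorem solution_spec : Claim_equal_solution := by
  intro people tshirts _
  unfold Spec_solution solution solution_alt
  have hnd : (PySem.Dict.counter tshirts : PySem.Dict Int Int).keys.Nodup :=
    PySem.Dict.nodup_keys_counter tshirts
  exact loop_eq _ _ _ (counterSub_nodup_keys _ _ hnd) (counterSub_pos _ _ hnd)
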